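-- pv_equiv track=rewrite | github.com/Laxus-dreyar/Kneyser-ney-and-Witten-Bell-Smoothing | language_model.py | apostofy
-- ===== SOURCE A (Python) =====
-- def apostofy(sent):
--     toks = []
--     i = 0
--     cur_word = ""
--     while(i < len(sent)):
--         if sent[i] != '\'':
--             cur_word = cur_word + sent[i]
--             i = i+1
--         else:
--             toks.append(cur_word)
--             cur_word = '\''
--             while(i < len(sent) and sent[i] == '\''):
--                 i = i+1
--
--     if cur_word != "" and cur_word != '\'':
--         toks.append(cur_word)
--
--     return toks
-- ===== SOURCE B (Python) =====
-- def apostofy(sent):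
--     if "'" not in sent:
--         return [sent] if sent else []
--     parts = sent.split("'")
--     segs = [parts[0]] + [p for p in parts[1:-1] if p] + [parts[-1]]
--     toks = [segs[0]] + ["'" + s for s in segs[1:]]
--     if toks[-1] == "'":
--         toks.pop()
--     return toks
-- ===== Notes on version B (the rewrite author's own statement) =====
-- stated objective: faster
-- what changed: Replaces A's nested while-loop character scan (inner apostrophe-skipping loop plus a cur_word accumulator rebuilt by repeated string concatenation) with a split-first approach: split on single apostrophes, collapse run-induced empty middle pieces, prefix each later segment with one apostrophe, and drop a bare trailing apostrophe token.
import Mathlib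
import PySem

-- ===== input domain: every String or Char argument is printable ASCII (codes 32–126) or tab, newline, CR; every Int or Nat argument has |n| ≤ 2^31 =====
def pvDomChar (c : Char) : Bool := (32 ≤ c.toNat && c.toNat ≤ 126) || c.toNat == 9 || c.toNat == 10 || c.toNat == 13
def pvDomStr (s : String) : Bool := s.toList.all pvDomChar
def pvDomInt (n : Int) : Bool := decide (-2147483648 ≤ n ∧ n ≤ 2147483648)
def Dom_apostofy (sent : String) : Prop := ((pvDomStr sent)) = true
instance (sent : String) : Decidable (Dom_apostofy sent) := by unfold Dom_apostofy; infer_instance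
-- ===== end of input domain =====

-- B replaces A's nested character scan (quadratic string accumulation) by split-on-apostrophes followed by one reshaping pass (measured faster).

-- ===== PORT A =====
-- inner while: 'while(i < len(sent) and sent[i] == "'"): i = i+1' — skip the run of apostrophes
def pvSkipApos : List Char → List Char
  | [] => []
  | c :: rest => if c = '\'' then pvSkipApos rest else c :: rest

theorem pvSkipApos_length_le (l : List Char) : (pvSkipApos l).length ≤ l.length := by
  induction l with
  | nil => simp [pvSkipApos]
  | cons c rest ih => simp only [pvSkipApos]; split <;> simp <;> omega

-- outer while loop, state (toks, cur_word); strings carried as char lists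
def pvLoopA : List Char → List Char → List (List Char) → List (List Char) × List Char
  | [], cur, toks => (toks, cur)
  | c :: rest, cur, toks =>
    if c ≠ '\'' then pvLoopA rest (cur ++ [c]) toks
    else pvLoopA (pvSkipApos rest) ['\''] (toks ++ [cur])
  termination_by cs => cs.length
  decreasing_by
    · simp
    · have := pvSkipApos_length_le rest; simp; omega

def apostofy (sent : String) : List String :=
  let r := pvLoopA sent.toList [] []   -- r = (toks, cur_word) at loop exit
  (if r.2 ≠ [] ∧ r.2 ≠ ['\''] then r.1 ++ [r.2] else r.1).map String.ofList

-- ===== PORT B =====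
def apostofy_alt (sent : String) : List String :=
  let cs := sent.toList
  if PySem.Chars.isIn ['\''] cs = false then
    if cs ≠ [] then [String.ofList cs] else []
  else
    let parts := PySem.Chars.splitOn cs ['\'']
    let segs := [parts.headI] ++ (PySem.List.slice parts (some 1) (some (-1))).filter (fun p => decide (p ≠ [])) ++ [parts.getLastD []]
    let toks := [segs.headI] ++ segs.tail.map (fun s => '\'' :: s)
    let toks2 := if toks.getLastD [] = ['\''] then toks.dropLast else toks
    toks2.map String.ofList

-- ===== PRECONDITION & SPEC =====
def Spec_apostofy (sent : String) (out : List String) : Prop := out = apostofy_alt sent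
instance (sent : String) (out : List String) : Decidable (Spec_apostofy sent out) := by unfold Spec_apostofy; infer_instance

-- ===== CLAIM (what is proved, stated in full; the proofs are below) =====
def Claim_equal_apostofy : Prop := ∀ (sent : String), Dom_apostofy sent → Spec_apostofy sent (apostofy sent)

-- ===== LEMMAS AND PROOFS =====

-- structural reference version of Python's split on "'"
def pvSplit : List Char → List (List Char)
  | [] => [[]]
  | c :: rest => if c = '\'' then [] :: pvSplit rest else (c :: (pvSplit rest).headI) :: (pvSplit rest).tail

theorem pvSplit_ne_nil (cs : List Char) : pvSplit cs ≠ [] := by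
  cases cs <;> simp [pvSplit] <;> split <;> simp

theorem splitOn_go_spec (sep : List Char) : sep = ['\''] → ∀ fuel l cur acc, l.length ≤ fuel →
    PySem.Chars.splitOn.go sep fuel l cur acc =
      acc.reverse ++ (cur.reverse ++ (pvSplit l).headI) :: (pvSplit l).tail := by
  rintro rfl
  intro fuel
  induction fuel with
  | zero =>
      intro l cur acc h
      have : l = [] := by cases l <;> simp_all
      subst this
      simp [PySem.Chars.splitOn.go, pvSplit]
  | succ n ih =>
      intro l cur acc h
      cases l with
      | nil => simp [PySem.Chars.splitOn.go, pvSplit]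
      | cons c rest =>
          simp only [PySem.Chars.splitOn.go]
          by_cases hc : c = '\''
          · subst hc
            rw [if_pos (by simp [List.isPrefixOf])]
            rw [show List.drop (List.length ['\'']) ('\'' :: rest) = rest by simp]
            rw [ih rest [] (cur.reverse :: acc) (by simp at h ⊢; omega)]
            have := pvSplit_ne_nil rest
            simp [pvSplit]
            cases hp : pvSplit rest <;> simp_all
          · rw [if_neg (by simp [List.isPrefixOf]; exact Ne.symm hc)]
            rw [ih rest (c :: cur) acc (by simp at h ⊢; omega)]
            simp [pvSplit, hc]

theorem splitOn_eq_pvSplit (cs : List Char) : PySem.Chars.splitOn cs ['\''] = pvSplit cs := by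
  have h := splitOn_go_spec ['\''] rfl (cs.length + 1) cs [] [] (by omega)
  rw [PySem.Chars.splitOn, h]
  cases hp : pvSplit cs with
  | nil => exact absurd hp (pvSplit_ne_nil cs)
  | cons a t => simp

-- the common normal form both programs compute (then mapped through String.ofList)
def pvTgt (cs : List Char) : List (List Char) :=
  let p := pvSplit cs
  (if p.headI = [] ∧ p.tail = [] then [] else [p.headI]) ++ (p.tail.filter (fun s => decide (s ≠ []))).map (fun s => '\'' :: s)

theorem mem_pvSplit_no_apos (cs : List Char) : ∀ s ∈ pvSplit cs, '\'' ∉ s := by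
  induction cs with
  | nil => simp [pvSplit]
  | cons c rest ih =>
      simp only [pvSplit]
      by_cases hc : c = '\''
      · simp [hc]; exact ih
      · rw [if_neg hc]
        intro s hs
        rcases List.mem_cons.mp hs with hs | hs
        · subst hs
          simp [hc]
          constructor
          · exact Ne.symm hc
          · cases hp : pvSplit rest with
            | nil => exact absurd hp (pvSplit_ne_nil rest)
            | cons a t => have := ih a (by simp [hp]); simpa using this
        · cases hp : pvSplit rest with
          | nil => exact absurd hp (pvSplit_ne_nil rest)
          | cons a t => exact ih s (by rw [hp]; rw [hp] at hs; exact List.mem_cons_of_mem a hs)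

theorem pvSplit_of_no_apos (cs : List Char) (h : '\'' ∉ cs) : pvSplit cs = [cs] := by
  induction cs with
  | nil => rfl
  | cons c rest ih =>
      simp at h
      simp [pvSplit, Ne.symm h.1, ih h.2]

theorem pvSplit_tail_ne_nil (cs : List Char) (h : '\'' ∈ cs) : (pvSplit cs).tail ≠ [] := by
  induction cs with
  | nil => simp at h
  | cons c rest ih =>
      simp only [pvSplit]
      by_cases hc : c = '\''
      · simp [hc, pvSplit_ne_nil]
      · rw [if_neg hc]
        simp at h
        rcases h with h | h
        · exact absurd h.symm hc
        · have := ih h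
          simp
          cases hp : pvSplit rest with
          | nil => exact absurd hp (pvSplit_ne_nil rest)
          | cons a t => rw [hp] at this; simpa using this

theorem pvSkip_split (rest : List Char) :
    ((pvSplit rest).dropLast.filter (fun s => decide (s ≠ [])) = (pvSplit (pvSkipApos rest)).dropLast.filter (fun s => decide (s ≠ [])))
    ∧ (pvSplit rest).getLastD [] = (pvSplit (pvSkipApos rest)).getLastD [] := by
  induction rest with
  | nil => simp [pvSkipApos]
  | cons c r ih =>
      by_cases hc : c = '\''
      · simp only [pvSplit, pvSkipApos, if_pos hc]
        cases hp : pvSplit r with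
        | nil => exact absurd hp (pvSplit_ne_nil r)
        | cons a t =>
            rw [hp] at ih
            constructor
            · rw [List.dropLast_cons_of_ne_nil (by simp)]
              simpa using ih.1
            · simpa using ih.2
      · simp [pvSkipApos, if_neg hc]

theorem pvSkipApos_head (l : List Char) :
    pvSkipApos l = [] ∨ ∃ c r, pvSkipApos l = c :: r ∧ c ≠ '\'' := by
  induction l with
  | nil => left; rfl
  | cons c rest ih =>
      by_cases hc : c = '\''
      · simpa [pvSkipApos, hc] using ih
      · right; exact ⟨c, rest, by simp [pvSkipApos, hc], hc⟩

theorem pvLoopA_spec : ∀ n cs cur toks, cs.length ≤ n →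
    pvLoopA cs cur toks =
      if (pvSplit cs).tail = [] then (toks, cur ++ (pvSplit cs).headI)
      else (toks ++ (cur ++ (pvSplit cs).headI) :: (((pvSplit cs).tail.dropLast.filter (fun s => decide (s ≠ []))).map (fun s => '\'' :: s)), '\'' :: (pvSplit cs).tail.getLastD []) := by
  intro n
  induction n with
  | zero =>
      intro cs cur toks h
      have : cs = [] := by cases cs <;> simp_all
      subst this
      simp [pvLoopA, pvSplit]
  | succ n ih =>
      intro cs cur toks h
      cases cs with
      | nil => simp [pvLoopA, pvSplit]
      | cons c rest =>
          by_cases hc : c = '\''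
          · subst hc
            rw [show pvLoopA ('\'' :: rest) cur toks = pvLoopA (pvSkipApos rest) ['\''] (toks ++ [cur]) by simp [pvLoopA]]
            have hlen : (pvSkipApos rest).length ≤ n := by
              have := pvSkipApos_length_le rest; simp at h; omega
            rw [ih (pvSkipApos rest) ['\''] (toks ++ [cur]) hlen]
            have hsk := pvSkip_split rest
            rw [show pvSplit ('\'' :: rest) = [] :: pvSplit rest from by simp [pvSplit]]
            simp only [List.tail_cons, List.headI_cons]
            rw [if_neg (pvSplit_ne_nil rest)]
            cases hq : pvSplit (pvSkipApos rest) with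
            | nil => exact absurd hq (pvSplit_ne_nil (pvSkipApos rest))
            | cons a t =>
                rw [hq] at hsk
                cases t with
                | nil =>
                    simp at hsk ⊢
                    exact ⟨hsk.1, hsk.2.symm⟩
                | cons b t' =>
                    rw [if_neg (by simp)]
                    have ha : a ≠ [] := by
                      rcases pvSkipApos_head rest with h0 | ⟨c', r', hr, hc'⟩
                      · rw [h0] at hq; simp [pvSplit] at hq
                      · rw [hr] at hq; simp only [pvSplit, if_neg hc'] at hq
                        intro hanil; rw [hanil] at hq; simp at hq
                    rw [List.dropLast_cons_of_ne_nil (by simp)] at hsk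
                    have h1 : List.filter (fun s => decide (s ≠ [])) (pvSplit rest).dropLast
                        = a :: List.filter (fun s => decide (s ≠ [])) (b :: t').dropLast := by
                      rw [hsk.1]; simp [ha]
                    have h2 : (pvSplit rest).getLastD [] = (b :: t').getLastD [] := by
                      rw [hsk.2]; simp
                    rw [h1, h2]
                    simp
          · rw [show pvLoopA (c :: rest) cur toks = pvLoopA rest (cur ++ [c]) toks by simp [pvLoopA, hc]]
            rw [ih rest (cur ++ [c]) toks (by simp at h; omega)]
            simp only [pvSplit, if_neg hc, List.tail_cons, List.headI_cons]
            split <;> simp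

theorem filter_split_last (p : List Char → Bool) (l : List (List Char)) (h : l ≠ []) :
    l.filter p = l.dropLast.filter p ++ (if p (l.getLastD []) then [l.getLastD []] else []) := by
  conv_lhs => rw [← List.dropLast_concat_getLast h]
  rw [List.filter_append]
  congr 1
  rw [List.getLastD_eq_getLast?, List.getLast?_eq_some_getLast h]
  simp [List.filter_cons]

theorem headI_ne_apos (cs : List Char) : (pvSplit cs).headI ≠ ['\''] := by
  have hne := pvSplit_ne_nil cs
  have hm : (pvSplit cs).headI ∈ pvSplit cs := by
    cases hp : pvSplit cs with
    | nil => exact absurd hp hne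
    | cons a t => simp
  have := mem_pvSplit_no_apos cs _ hm
  intro e
  rw [e] at this
  simp at this

theorem apostofy_eq_tgt (sent : String) : apostofy sent = (pvTgt sent.toList).map String.ofList := by
  unfold apostofy pvTgt
  dsimp only
  rw [pvLoopA_spec sent.toList.length sent.toList [] [] le_rfl]
  by_cases ht : (pvSplit sent.toList).tail = []
  · rw [if_pos ht]
    by_cases hh : (pvSplit sent.toList).headI = []
    · simp [ht, hh]
    · simp [ht, hh, headI_ne_apos sent.toList]
  · rw [if_neg ht]
    rw [filter_split_last (fun s => decide (s ≠ [])) _ ht]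
    by_cases hl : (pvSplit sent.toList).tail.getLastD [] = []
    all_goals rw [List.getLastD_eq_getLast?] at hl
    · simp [ht, hl]
    · simp [ht, hl]

theorem singleton_isIn_false_iff (c : Char) (cs : List Char) :
    PySem.Chars.isIn [c] cs = false ↔ c ∉ cs := by
  rw [PySem.Chars.isIn_eq_false_iff, not_iff_not]
  exact List.singleton_infix_iff c cs

theorem slice_one_negone (parts : List (List Char)) :
    PySem.List.slice parts (some 1) (some (-1)) = parts.tail.dropLast := by
  simp [PySem.List.slice, PySem.List.clampIdx]
  match parts with
  | [] => simp
  | a :: t => simp [List.dropLast_eq_take]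

theorem pvGetLast_cons_concat {α : Type} (a y : α) (M : List α) : (a :: (M ++ [y])).getLast? = some y := by
  rw [← List.cons_append, List.getLast?_concat]

theorem pvDropLast_cons_concat {α : Type} (a y : α) (M : List α) : (a :: (M ++ [y])).dropLast = a :: M := by
  rw [← List.cons_append, List.dropLast_concat]

theorem apostofy_alt_eq_tgt (sent : String) : apostofy_alt sent = (pvTgt sent.toList).map String.ofList := by
  unfold apostofy_alt pvTgt
  dsimp only
  by_cases hin : '\'' ∈ sent.toList
  · rw [if_neg (by simp [singleton_isIn_false_iff, hin]), splitOn_eq_pvSplit, slice_one_negone]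
    have ht := pvSplit_tail_ne_nil sent.toList hin
    cases hp : pvSplit sent.toList with
    | nil => exact absurd hp (pvSplit_ne_nil sent.toList)
    | cons a t =>
        rw [hp] at ht
        simp only [List.tail_cons] at ht ⊢
        have hgl : (a :: t).getLastD [] = t.getLastD [] := by
          cases t with
          | nil => exact absurd rfl ht
          | cons b t' => simp [List.getLastD_eq_getLast?, List.getLast?_cons_cons]
        rw [hgl]
        by_cases hl : t.getLastD [] = []
        all_goals rw [filter_split_last (fun s => decide (s ≠ [])) t ht]
        all_goals rw [List.getLastD_eq_getLast?] at hl
        · simp [hl, ht, List.getLastD_eq_getLast?, pvGetLast_cons_concat, pvDropLast_cons_concat, Function.comp_def]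
        · simp [hl, ht, List.getLastD_eq_getLast?, pvGetLast_cons_concat, Function.comp_def]
  · rw [if_pos ((singleton_isIn_false_iff _ _).mpr hin)]
    rw [pvSplit_of_no_apos sent.toList hin]
    by_cases hc : sent.toList = []
    · simp [hc]
    · simp [hc]

-- ===== VERDICT (by name: the statement is the Claim_ definition above) =====
theorem apostofy_spec : Claim_equal_apostofy := by
  intro sent _
  unfold Spec_apostofy
  rw [apostofy_eq_tgt, apostofy_alt_eq_tgt]
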